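-- pv_equiv track=rewrite | github.com/achal-vijayvargiya/Aahaar | backend/app/utils/smart_food_retriever.py | _normalize_goals
-- ===== SOURCE A (Python) =====
-- from typing import Dict, List, Optional, Set
--
-- GOAL_MAPPINGS = {
--     "lose weight": "weight_loss",
--     "weight loss": "weight_loss",
--     "fat loss": "weight_loss",
--     "gain weight": "weight_gain",
--     "weight gain": "weight_gain",
--     "muscle": "muscle_gain",
--     "muscle gain": "muscle_gain",
--     "build muscle": "muscle_gain",
--     "diabetes": "diabetes_management",
--     "blood sugar": "diabetes_management",
--     "digestion": "digestive_health",
--     "gut health": "digestive_health",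
--     "energy": "energy_boost",
--     "heart": "heart_health",
--     "immunity": "immunity_boost"
-- }
--
-- def _normalize_goals(goals: Optional[str]) -> List[str]:
--     """Normalize health goals to standard format"""
--     if not goals:
--         return []
--
--     goals_lower = goals.lower()
--     normalized = []
--
--     for key, value in GOAL_MAPPINGS.items():
--         if key in goals_lower and value not in normalized:
--             normalized.append(value)
--
--     # If no matches, add as-is
--     if not normalized:
--         normalized.append(goals.replace(" ", "_").lower())
--
--     return normalized
-- ===== SOURCE B (Python) =====
-- from typing import List, Optional
--
-- # Inverted mapping: canonical label -> its synonyms, labels in first-occurrence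
-- # order of GOAL_MAPPINGS' values, so the output order matches A's.
-- INVERTED = {
--     "weight_loss": ["lose weight", "weight loss", "fat loss"],
--     "weight_gain": ["gain weight", "weight gain"],
--     "muscle_gain": ["muscle", "muscle gain", "build muscle"],
--     "diabetes_management": ["diabetes", "blood sugar"],
--     "digestive_health": ["digestion", "gut health"],
--     "energy_boost": ["energy"],
--     "heart_health": ["heart"],
--     "immunity_boost": ["immunity"],
-- }
--
-- def _normalize_goals(goals: Optional[str]) -> List[str]:
--     """Normalize health goals to standard format"""
--     if not goals:
--         return []
--     goals_lower = goals.lower()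
--     normalized = [label for label, keys in INVERTED.items()
--                   if any(key in goals_lower for key in keys)]
--     if not normalized:
--         normalized.append(goals.replace(" ", "_").lower())
--     return normalized
-- ===== Notes on version B (the rewrite author's own statement) =====
-- stated objective: simpler
-- what changed: B inverts the synonym->label table into an ordered label->synonyms mapping and builds the result in one comprehension with any(), removing the membership-dedup check of A's per-synonym loop.
import Mathlib
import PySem

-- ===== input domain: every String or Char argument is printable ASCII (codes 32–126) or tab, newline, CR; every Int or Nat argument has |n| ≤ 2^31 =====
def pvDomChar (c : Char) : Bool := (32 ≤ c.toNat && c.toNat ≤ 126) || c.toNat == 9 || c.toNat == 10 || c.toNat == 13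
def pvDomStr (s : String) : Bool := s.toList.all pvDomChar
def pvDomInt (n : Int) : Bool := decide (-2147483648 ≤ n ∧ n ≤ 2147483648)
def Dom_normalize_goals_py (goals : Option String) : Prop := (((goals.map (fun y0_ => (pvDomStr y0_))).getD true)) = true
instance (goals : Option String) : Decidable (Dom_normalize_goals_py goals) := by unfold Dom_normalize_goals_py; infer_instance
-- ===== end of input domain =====

-- B inverts the synonym→label table into an ordered label→synonyms mapping and filters it with `any`,
-- removing A's membership-dedup; same output, same order.

-- ===== PORT A =====
def GOAL_MAPPINGS : List (String × String) :=
  [("lose weight", "weight_loss"), ("weight loss", "weight_loss"), ("fat loss", "weight_loss"),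
   ("gain weight", "weight_gain"), ("weight gain", "weight_gain"),
   ("muscle", "muscle_gain"), ("muscle gain", "muscle_gain"), ("build muscle", "muscle_gain"),
   ("diabetes", "diabetes_management"), ("blood sugar", "diabetes_management"),
   ("digestion", "digestive_health"), ("gut health", "digestive_health"),
   ("energy", "energy_boost"), ("heart", "heart_health"), ("immunity", "immunity_boost")]

-- loop body of A: `if key in goals_lower and value not in normalized: normalized.append(value)`
def goalStepA (gl : String) (n : List String) (kv : String × String) : List String :=
  if PySem.Str.isIn kv.1 gl && !(n.contains kv.2) then n ++ [kv.2] else n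

def normalize_goals_py (goals : Option String) : List String :=
  match goals with
  | none => []
  | some g =>
    if g = "" then []
    else
      let goals_lower := PySem.Str.lower g
      let normalized := GOAL_MAPPINGS.foldl (goalStepA goals_lower) []
      if normalized = [] then [PySem.Str.lower (PySem.Str.replace g " " "_")] else normalized

-- ===== PORT B =====
def INVERTED : List (String × List String) :=
  [("weight_loss", ["lose weight", "weight loss", "fat loss"]),
   ("weight_gain", ["gain weight", "weight gain"]),
   ("muscle_gain", ["muscle", "muscle gain", "build muscle"]),
   ("diabetes_management", ["diabetes", "blood sugar"]),
   ("digestive_health", ["digestion", "gut health"]),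
   ("energy_boost", ["energy"]),
   ("heart_health", ["heart"]),
   ("immunity_boost", ["immunity"])]

def normalize_goals_py_alt (goals : Option String) : List String :=
  match goals with
  | none => []
  | some g =>
    if g = "" then []
    else
      let goals_lower := PySem.Str.lower g
      let normalized := (INVERTED.filter (fun lv => lv.2.any (fun k => PySem.Str.isIn k goals_lower))).map Prod.fst
      if normalized = [] then [PySem.Str.lower (PySem.Str.replace g " " "_")] else normalized

-- ===== PRECONDITION & SPEC =====
def Spec_normalize_goals_py (goals : Option String) (out : List String) : Prop := out = normalize_goals_py_alt goals
instance (goals : Option String) (out : List String) : Decidable (Spec_normalize_goals_py goals out) := by unfold Spec_normalize_goals_py; infer_instance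

-- ===== CLAIM (what is proved, stated in full; the proofs are below) =====
def Claim_equal_normalize_goals_py : Prop := ∀ (goals : Option String), Dom_normalize_goals_py goals → Spec_normalize_goals_py goals (normalize_goals_py goals)

-- ===== LEMMAS AND PROOFS =====

-- A's loop body, abstracted over the key-match predicate (goalStepA gl = stepG (isIn · gl) by rfl).
def stepG (f : String → Bool) (n : List String) (kv : String × String) : List String :=
  if f kv.1 && !(n.contains kv.2) then n ++ [kv.2] else n

-- Once a group's label is already in the accumulator, A's loop over that group is a no-op.
lemma foldG_mem (f : String → Bool) (v : String) (ks : List String) (acc : List String)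
    (h : v ∈ acc) :
    (ks.map (fun k => (k, v))).foldl (stepG f) acc = acc := by
  induction ks with
  | nil => rfl
  | cons k ks ih =>
    simp only [List.map_cons, List.foldl_cons, stepG, List.contains_eq_mem,
      h, decide_true, Bool.not_true, Bool.and_false]
    simpa using ih

-- A's loop over one group (all pairs sharing label v, v not yet collected) appends v iff some key matches.
lemma foldG_group (f : String → Bool) (v : String) (ks : List String) (acc : List String)
    (h : v ∉ acc) :
    (ks.map (fun k => (k, v))).foldl (stepG f) acc
      = if ks.any f then acc ++ [v] else acc := by
  induction ks with
  | nil => simp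
  | cons k ks ih =>
    simp only [List.map_cons, List.foldl_cons, List.any_cons]
    by_cases hk : f k = true
    · have h1 : stepG f acc (k, v) = acc ++ [v] := by
        simp only [stepG, hk, List.contains_eq_mem, h, decide_false, Bool.not_false,
          Bool.and_true, if_true]
      rw [h1, foldG_mem f v ks (acc ++ [v]) (by simp)]; simp [hk]
    · have hk' : f k = false := by simpa using hk
      have h1 : stepG f acc (k, v) = acc := by
        simp [stepG, hk']
      rw [h1, ih]; simp [hk']

-- A's fold over the flattened groups equals B's filter-map over the grouped table,
-- provided the labels are fresh for the accumulator and pairwise distinct.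
lemma foldG_grouped (f : String → Bool) (gs : List (String × List String)) (acc : List String)
    (hfresh : ∀ p ∈ gs, p.1 ∉ acc) (hnd : (gs.map Prod.fst).Nodup) :
    (gs.flatMap (fun p => p.2.map (fun k => (k, p.1)))).foldl (stepG f) acc
      = acc ++ (gs.filter (fun lv => lv.2.any f)).map Prod.fst := by
  induction gs generalizing acc with
  | nil => simp
  | cons p gs ih =>
    simp only [List.flatMap_cons, List.foldl_append]
    rw [foldG_group f p.1 p.2 acc (hfresh p (by simp)), List.filter_cons]
    by_cases hp : p.2.any f = true
    · have hnd' : p.1 ∉ gs.map Prod.fst ∧ (gs.map Prod.fst).Nodup := by simpa using hnd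
      have hfresh' : ∀ q ∈ gs, q.1 ∉ acc ++ [p.1] := by
        intro q hq
        simp only [List.mem_append, List.mem_singleton]
        rintro (hqa | hq1)
        · exact hfresh q (List.mem_cons_of_mem _ hq) hqa
        · exact hnd'.1 (hq1 ▸ List.mem_map_of_mem hq)
      rw [if_pos hp, if_pos hp, ih (acc ++ [p.1]) hfresh' hnd'.2]
      simp
    · rw [if_neg hp, if_neg hp, ih acc (fun q hq => hfresh q (List.mem_cons_of_mem _ hq))
        (by simpa using hnd.of_cons)]

-- The concrete tables: A's list is exactly B's grouped table flattened.
lemma foldA_eq_foldB (gl : String) :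
    GOAL_MAPPINGS.foldl (goalStepA gl) []
      = (INVERTED.filter (fun lv => lv.2.any (fun k => PySem.Str.isIn k gl))).map Prod.fst := by
  have hstep : goalStepA gl = stepG (fun k => PySem.Str.isIn k gl) := rfl
  have hflat : GOAL_MAPPINGS = INVERTED.flatMap (fun p => p.2.map (fun k => (k, p.1))) := by decide
  rw [hstep, hflat,
    foldG_grouped (fun k => PySem.Str.isIn k gl) INVERTED [] (by intro p _; simp) (by decide)]
  simp

-- ===== VERDICT (by name: the statement is the Claim_ definition above) =====
theorem normalize_goals_py_spec : Claim_equal_normalize_goals_py := by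
  intro goals _
  unfold Spec_normalize_goals_py normalize_goals_py normalize_goals_py_alt
  match goals with
  | none => rfl
  | some g =>
    by_cases hg : g = ""
    · simp [hg]
    · simp only [hg, if_false]
      rw [foldA_eq_foldB (PySem.Str.lower g)]
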